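-- pv_equiv track=rewrite | github.com/Nikolay-Lysenko/dodecaphony | dodecaphony/rendering.py | get_lilypond_order_of_voices
-- ===== SOURCE A (Python) =====
-- from math import ceil, floor
--
-- def get_lilypond_order_of_voices(n_voices: int) -> list[int]:
--     """
--     Enumerate voices (from highest to lowest) in Lilypond order.
--
--     See more about Lilypond order ('Voice order' section):
--     http://lilypond.org/doc/v2.18/Documentation/notation/multiple-voices
--
--     :param n_voices:
--         number of voices in a fragment to be rendered
--     :return:
--         indices of voices in Lilypond order
--     """
--     def enumerate_for_one_staff(n_voices_at_staff: int) -> list[int]: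
--         max_index = n_voices_at_staff - 1
--         results = []
--         for i in range(n_voices_at_staff):
--             result = max_index - int(round(2 * abs(i - max_index / 2)))
--             result += int(i < max_index / 2)
--             results.append(result)
--         return results
--
--     n_voices_at_upper_staff = ceil(n_voices / 2)
--     n_voices_at_lower_staff = floor(n_voices / 2)
--     lower_voices_priorities = [
--         x + n_voices_at_upper_staff
--         for x in enumerate_for_one_staff(n_voices_at_lower_staff)
--     ]
--     upper_voices_priorities = enumerate_for_one_staff(n_voices_at_upper_staff)
--     priorities = lower_voices_priorities + upper_voices_priorities
--     ordering = sorted(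
--         list((index, priority) for index, priority in enumerate(priorities)),
--         key=lambda x: x[1], reverse=True
--     )
--     ordering = [x[0] for x in ordering]
--     return ordering
-- ===== SOURCE B (Python) =====
-- def get_lilypond_order_of_voices(n_voices: int) -> list[int]:
--     """Enumerate voices (from highest to lowest) in Lilypond order.
--
--     Closed-form construction: within a staff of m voices, the voice listed at
--     descending priority p is (p-1)//2 if p is odd else m-1-p//2; lower-staff
--     voices (which come first in the index space and have the higher priorities)
--     are emitted first, then upper-staff voices shifted past the lower indices.
--     """
--     def staff_order(m: int) -> list[int]:
--         out = []
--         for p in range(m - 1, -1, -1):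
--             out.append((p - 1) // 2 if p % 2 else m - 1 - p // 2)
--         return out
--
--     n_upper = (n_voices + 1) // 2
--     n_lower = n_voices // 2
--     return staff_order(n_lower) + [x + n_lower for x in staff_order(n_upper)]
-- ===== Notes on version B (the rewrite author's own statement) =====
-- stated objective: faster
-- what changed: Replaces the per-voice rounding-formula priorities plus a descending stable sort of (index, priority) pairs by a direct closed-form emission of each staff's voice order (no priorities list, no sort).
import Mathlib
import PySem

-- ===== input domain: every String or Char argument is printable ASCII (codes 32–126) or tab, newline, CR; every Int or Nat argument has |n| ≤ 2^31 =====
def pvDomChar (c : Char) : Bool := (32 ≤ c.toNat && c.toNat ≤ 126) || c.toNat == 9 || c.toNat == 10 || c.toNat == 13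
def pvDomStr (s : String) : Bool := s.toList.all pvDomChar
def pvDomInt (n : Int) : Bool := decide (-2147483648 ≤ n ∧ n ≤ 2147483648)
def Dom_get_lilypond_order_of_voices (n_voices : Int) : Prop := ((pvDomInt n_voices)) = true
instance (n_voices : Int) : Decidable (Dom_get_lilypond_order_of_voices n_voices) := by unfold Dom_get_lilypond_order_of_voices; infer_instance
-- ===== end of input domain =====

-- B replaces A's rounding-formula priorities + descending stable sort by a direct
-- closed-form emission of each staff's voice order (no priorities list, no sort).

-- ===== PORT A =====
-- Float exactness notes (|n_voices| ≤ 2^31): max_index/2 is a half-integer, exact in a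
-- double; round(2*abs(i - max_index/2)) is exactly |2*i - max_index| (an integer, round
-- is the identity on it) and int(i < max_index/2) is (2*i < max_index), so those float
-- expressions are ported as the equal integer expressions; ceil(n/2)/floor(n/2) on the
-- exact float n/2 are the integer ceiling (n+1)//2 and floor n//2.
def pvEnumerateForOneStaff (n_voices_at_staff : Int) : List Int :=
  let max_index := n_voices_at_staff - 1
  (PySem.List.pyRange 0 n_voices_at_staff 1).foldl
    (fun results i =>
      results ++ [max_index - ((2 * i - max_index).natAbs : Int)
                    + (if 2 * i < max_index then 1 else 0)]) []

def get_lilypond_order_of_voices (n_voices : Int) : List Int :=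
  let n_voices_at_upper_staff := PySem.Int.floordiv (n_voices + 1) 2
  let n_voices_at_lower_staff := PySem.Int.floordiv n_voices 2
  let lower_voices_priorities :=
    (pvEnumerateForOneStaff n_voices_at_lower_staff).map (fun x => x + n_voices_at_upper_staff)
  let upper_voices_priorities := pvEnumerateForOneStaff n_voices_at_upper_staff
  let priorities := lower_voices_priorities ++ upper_voices_priorities
  let ordering := PySem.List.sorted (PySem.List.enumerate priorities) (fun x => x.2) true
  ordering.map (fun x => x.1)

-- ===== PORT B =====
def pvStaffOrder (m : Int) : List Int :=
  (PySem.List.pyRange (m - 1) (-1) (-1)).foldl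
    (fun out p =>
      out ++ [if PySem.Int.mod p 2 ≠ 0 then PySem.Int.floordiv (p - 1) 2
              else m - 1 - PySem.Int.floordiv p 2]) []

def get_lilypond_order_of_voices_alt (n_voices : Int) : List Int :=
  let n_upper := PySem.Int.floordiv (n_voices + 1) 2
  let n_lower := PySem.Int.floordiv n_voices 2
  pvStaffOrder n_lower ++ (pvStaffOrder n_upper).map (fun x => x + n_lower)

-- ===== PRECONDITION & SPEC =====
def Spec_get_lilypond_order_of_voices (n_voices : Int) (out : List Int) : Prop := out = get_lilypond_order_of_voices_alt n_voices
instance (n_voices : Int) (out : List Int) : Decidable (Spec_get_lilypond_order_of_voices n_voices out) := by unfold Spec_get_lilypond_order_of_voices; infer_instance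

-- ===== CLAIM (what is proved, stated in full; the proofs are below) =====
def Claim_equal_get_lilypond_order_of_voices : Prop := ∀ (n_voices : Int), Dom_get_lilypond_order_of_voices n_voices → Spec_get_lilypond_order_of_voices n_voices (get_lilypond_order_of_voices n_voices)

-- ===== LEMMAS AND PROOFS =====

-- the per-voice priority A computes for local index i on a staff of m voices
def pvPrio (m i : Int) : Int :=
  m - 1 - ((2 * i - (m - 1)).natAbs : Int) + (if 2 * i < m - 1 then 1 else 0)

-- B's closed form: the local index holding priority p on a staff of m voices
def pvInv (m p : Int) : Int :=
  if PySem.Int.mod p 2 ≠ 0 then PySem.Int.floordiv (p - 1) 2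
  else m - 1 - PySem.Int.floordiv p 2

-- the global index holding global priority p (lower staff = indices 0..ml-1, priorities mu..mu+ml-1)
def pvGidx (mu ml p : Int) : Int :=
  if mu ≤ p then pvInv ml (p - mu) else ml + pvInv mu p

lemma pvFloordiv_two (a : Int) : PySem.Int.floordiv a 2 = a / 2 := by
  unfold PySem.Int.floordiv; rw [Int.fdiv_eq_ediv]; simp

lemma pvMod_two (a : Int) : PySem.Int.mod a 2 = a % 2 := by
  unfold PySem.Int.mod; rw [Int.fmod_eq_emod]; simp

lemma pvEnumerateForOneStaff_eq (m : Int) :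
    pvEnumerateForOneStaff m = (PySem.List.pyRange 0 m 1).map (pvPrio m) := by
  unfold pvEnumerateForOneStaff pvPrio
  rw [PySem.List.foldl_append_singleton_eq_map]
  simp

lemma pvStaffOrder_eq (m : Int) :
    pvStaffOrder m = (PySem.List.pyRange (m - 1) (-1) (-1)).map (pvInv m) := by
  unfold pvStaffOrder pvInv
  rw [PySem.List.foldl_append_singleton_eq_map]
  simp

-- pvInv is a right inverse of pvPrio on [0, m), with the right bounds
lemma pvInv_bounds {m p : Int} (_h0 : 0 ≤ p) (h1 : p < m) :
    0 ≤ pvInv m p ∧ pvInv m p < m := by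
  unfold pvInv
  rw [pvMod_two, pvFloordiv_two, pvFloordiv_two]
  split_ifs <;> omega

lemma pvPrio_pvInv {m p : Int} (_h0 : 0 ≤ p) (h1 : p < m) :
    pvPrio m (pvInv m p) = p := by
  unfold pvInv pvPrio
  rw [pvMod_two, pvFloordiv_two, pvFloordiv_two]
  split_ifs <;> omega

-- the priorities list A builds, as a single map over range n (mu = ⌈n/2⌉, ml = ⌊n/2⌋)
lemma pvPriorities_eq (mu ml n : Int) (h0 : 0 ≤ ml) (h1 : ml ≤ n) (h2 : mu + ml = n) :
    (((PySem.List.pyRange 0 ml 1).map (pvPrio ml)).map (fun x => x + mu))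
      ++ (PySem.List.pyRange 0 mu 1).map (pvPrio mu)
    = (PySem.List.pyRange 0 n 1).map
        (fun j => if j < ml then pvPrio ml j + mu else pvPrio mu (j - ml)) := by
  rw [List.map_map, PySem.List.pyRange_one_append 0 ml n h0 h1, List.map_append]
  congr 1
  · exact (List.map_congr_left (fun j hj => by
      rw [PySem.List.mem_pyRange_one] at hj
      simp [if_pos hj.2])).symm
  · rw [show PySem.List.pyRange ml n 1
        = (PySem.List.pyRange 0 mu 1).map (fun i => i + ml) by
      rw [PySem.List.pyRange_one, PySem.List.pyRange_one, List.map_map,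
          show (mu - 0).toNat = (n - ml).toNat by omega]
      apply List.map_congr_left
      intro k _
      simp; omega]
    rw [List.map_map]
    apply List.map_congr_left
    intro i hi
    rw [PySem.List.mem_pyRange_one] at hi
    simp only [Function.comp]
    rw [if_neg (by omega)]
    congr 1
    omega

-- ===== VERDICT helper: the main equality =====
theorem pvMain (n : Int) :
    get_lilypond_order_of_voices n = get_lilypond_order_of_voices_alt n := by
  unfold get_lilypond_order_of_voices get_lilypond_order_of_voices_alt
  simp only [pvEnumerateForOneStaff_eq, pvStaffOrder_eq, pvFloordiv_two]
  set mu : Int := (n + 1) / 2 with hmu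
  set ml : Int := n / 2 with hml
  have hmuml : mu + ml = n := by omega
  have hmlmu : ml ≤ mu := by omega
  by_cases hn : n ≤ 0
  · -- both staves are empty (ml ≤ 0 and mu ≤ 0): everything is []
    have h1 : ml ≤ 0 := by omega
    have h2 : mu ≤ 0 := by omega
    rw [PySem.List.pyRange_one_eq_nil (by omega), PySem.List.pyRange_one_eq_nil (by omega),
        PySem.List.pyRange_neg_one_eq_nil (by omega), PySem.List.pyRange_neg_one_eq_nil (by omega)]
    rfl
  · replace hn : 0 < n := by omega
    have hml0 : 0 ≤ ml := by omega
    have hmu0 : 0 < mu := by omega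
    -- name the priorities list and rewrite it as one map over range n
    rw [pvPriorities_eq mu ml n hml0 (by omega) hmuml]
    set P : List Int := (PySem.List.pyRange 0 n 1).map
        (fun j => if j < ml then pvPrio ml j + mu else pvPrio mu (j - ml)) with hP
    -- key pointwise facts about the inverse permutation
    have hgb : ∀ p : Int, 0 ≤ p → p < n → 0 ≤ pvGidx mu ml p ∧ pvGidx mu ml p < n := by
      intro p h0 h1
      unfold pvGidx
      split_ifs with h
      · have := pvInv_bounds (m := ml) (p := p - mu) (by omega) (by omega)
        omega
      · have := pvInv_bounds (m := mu) (p := p) h0 (by omega)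
        omega
    have hPg : ∀ p : Int, 0 ≤ p → p < n → PySem.List.pyGetD P (pvGidx mu ml p) 0 = p := by
      intro p h0 h1
      have hb := hgb p h0 h1
      rw [hP, PySem.List.pyGetD_map_pyRange_of_nonneg _ _ _ _ hb.1 hb.2]
      by_cases h : mu ≤ p
      · have hib := pvInv_bounds (m := ml) (p := p - mu) (by omega) (by omega)
        have hg : pvGidx mu ml p = pvInv ml (p - mu) := by unfold pvGidx; rw [if_pos h]
        rw [hg, if_pos (by omega), pvPrio_pvInv (by omega) (by omega)]
        omega
      · have hib := pvInv_bounds (m := mu) (p := p) h0 (by omega)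
        have hg : pvGidx mu ml p = ml + pvInv mu p := by unfold pvGidx; rw [if_neg h]
        rw [hg, if_neg (by omega),
            show ml + pvInv mu p - ml = pvInv mu p by ring,
            pvPrio_pvInv h0 (by omega)]
    -- the descending-priority pair list C
    set C : List (Int × Int) :=
      (PySem.List.pyRange (n - 1) (-1) (-1)).map (fun p => (pvGidx mu ml p, p)) with hC
    -- C is strictly decreasing in the sort key
    have hpw : List.Pairwise (fun a b : Int × Int => b.2 < a.2) C := by
      rw [hC, List.pairwise_map, PySem.List.pyRange_neg_one_eq_reverse, List.pairwise_reverse]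
      simpa using PySem.List.pairwise_lt_pyRange_one 0 n
    -- the descending range mapped through pvGidx is a permutation of range n
    have hlen : (PySem.List.pyRange (n - 1) (-1) (-1)).length
        = (PySem.List.pyRange 0 n 1).length := by
      rw [PySem.List.length_pyRange_neg_one, PySem.List.length_pyRange_one]
      omega
    have hmemd : ∀ p : Int, p ∈ PySem.List.pyRange (n - 1) (-1) (-1) → 0 ≤ p ∧ p < n := by
      intro p hp
      rw [PySem.List.mem_pyRange_neg_one] at hp
      omega
    have hpermIdx : ((PySem.List.pyRange (n - 1) (-1) (-1)).map (pvGidx mu ml)).Perm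
        (PySem.List.pyRange 0 n 1) := by
      apply List.Subperm.perm_of_length_le
      · apply List.Nodup.subperm
        · apply List.Nodup.map_on
          · intro x hx y hy hxy
            obtain ⟨hx0, hx1⟩ := hmemd x hx
            obtain ⟨hy0, hy1⟩ := hmemd y hy
            have := hPg x hx0 hx1
            have := hPg y hy0 hy1
            rw [hxy] at *
            omega
          · rw [PySem.List.pyRange_neg_one_eq_reverse, List.nodup_reverse]
            exact PySem.List.nodup_pyRange_one _ _
        · intro x hx
          rw [List.mem_map] at hx
          obtain ⟨p, hp, rfl⟩ := hx
          obtain ⟨h0, h1⟩ := hmemd p hp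
          rw [PySem.List.mem_pyRange_one]
          exact hgb p h0 h1
      · rw [List.length_map, hlen]
    -- C is a permutation of enumerate(priorities)
    have hlenP : (PySem.List.len P : Int) = n := by
      rw [hP]
      simp [PySem.List.len_eq, PySem.List.length_pyRange_one]
      omega
    have hperm : C.Perm (PySem.List.enumerate P) := by
      rw [PySem.List.enumerate_eq_map_pyRange P 0, hlenP]
      have hCeq : C = ((PySem.List.pyRange (n - 1) (-1) (-1)).map (pvGidx mu ml)).map
          (fun j => (j, PySem.List.pyGetD P j 0)) := by
        rw [hC, List.map_map]
        apply List.map_congr_left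
        intro p hp
        obtain ⟨h0, h1⟩ := hmemd p hp
        simp only [Function.comp]
        rw [hPg p h0 h1]
      rw [hCeq]
      exact hpermIdx.map _
    -- A's sort is exactly C
    rw [PySem.List.sorted_rev_eq_of_perm_of_pairwise_gt _ C _ hperm hpw]
    -- finally: map fst C equals B's concatenation
    rw [hC, List.map_map]
    rw [PySem.List.pyRange_neg_one, PySem.List.pyRange_neg_one, PySem.List.pyRange_neg_one,
        List.map_map, List.map_map, List.map_map]
    rw [show (n - 1 - -1).toNat = (ml - 1 - -1).toNat + (mu - 1 - -1).toNat by omega,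
        List.range_add, List.map_append]
    simp only [List.map_map]
    congr 1
    · apply List.map_congr_left
      intro k hk
      rw [List.mem_range] at hk
      simp only [Function.comp]
      unfold pvGidx
      rw [if_pos (by omega)]
      congr 1
      omega
    · apply List.map_congr_left
      intro k hk
      rw [List.mem_range] at hk
      simp only [Function.comp]
      rw [show n - 1 - (((ml - 1 - -1).toNat : Nat) + k : Nat) = mu - 1 - k by push_cast; omega]
      unfold pvGidx
      rw [if_neg (by omega)]
      omega

-- ===== VERDICT (by name: the statement is the Claim_ definition above) =====
theorem get_lilypond_order_of_voices_spec : Claim_equal_get_lilypond_order_of_voices := by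
  intro n _
  unfold Spec_get_lilypond_order_of_voices
  exact pvMain n
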